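-- pv_equiv track=rewrite | github.com/junkofujiwara/teams-transcript-to-csv | util/file.py | convert
-- ===== SOURCE A (Python) =====
-- def convert(lines, timeseparator="-->"):
--     """Converts a list of lines to a list of lists"""
--     data = []
--     item = []
--     count = 0
--     for line in lines:
--         if timeseparator in line:
--             count = 0
--             row = line.split(timeseparator)
--             item = []
--             item.append(row[0].strip())
--             item.append(row[1].strip())
--         else:
--             count += 1
--             item.append(line)
--             if count == 2:
--                 data.append(item)
--     return data
-- ===== SOURCE B (Python) =====
-- def convert(lines, timeseparator="-->"):
--     """Converts a list of lines to a list of lists"""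
--     # Pass 1: partition lines into blocks, one per separator line (plus a
--     # headerless leading block).
--     blocks = []
--     header, content = [], []
--     for line in lines:
--         if timeseparator in line:
--             blocks.append((header, content))
--             row = line.split(timeseparator)
--             header = [row[0].strip(), row[1].strip()]
--             content = []
--         else:
--             content.append(line)
--     blocks.append((header, content))
--     # Pass 2: a block qualifies iff it has at least 2 content lines.
--     return [h + c for h, c in blocks if len(c) >= 2]
-- ===== Notes on version B (the rewrite author's own statement) =====
-- stated objective: alternative
-- what changed: Replaces A's single stateful loop (aliased item list, running count, append-on-count==2) with two passes: first partition the lines into (header, content) blocks at each separator line, then emit header+content for every block with at least 2 content lines.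
import Mathlib
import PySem

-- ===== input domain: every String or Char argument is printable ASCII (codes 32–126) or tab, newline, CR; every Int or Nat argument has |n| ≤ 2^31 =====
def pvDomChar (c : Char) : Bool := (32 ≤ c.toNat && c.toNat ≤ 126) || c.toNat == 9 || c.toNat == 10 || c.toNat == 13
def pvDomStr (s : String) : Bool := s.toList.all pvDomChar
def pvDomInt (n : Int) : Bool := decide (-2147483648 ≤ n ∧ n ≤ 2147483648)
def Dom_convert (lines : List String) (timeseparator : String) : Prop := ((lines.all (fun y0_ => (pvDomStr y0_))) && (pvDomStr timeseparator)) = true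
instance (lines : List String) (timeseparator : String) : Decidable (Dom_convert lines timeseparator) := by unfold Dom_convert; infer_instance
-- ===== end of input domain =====

-- B restructures A as two passes (partition into blocks, then emit qualifying blocks); same return value.

-- ===== PORT A =====
-- header of a separator line: [row[0].strip(), row[1].strip()].  Pre_ gives sep ≠ "" so
-- split? is some; 'sep in line' gives the split at least 2 parts, so the getD defaults never fire.
def pvHeader (sep line : String) : List String :=
  let row := (PySem.Str.split? line sep).getD []
  [PySem.Str.strip (row.getD 0 ""), PySem.Str.strip (row.getD 1 "")]

-- A's loop state (data, item, count).  Python appends the ALIASED item to data the moment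
-- count hits 2, so later appends to item also show up in data; we model the alias exactly by
-- keeping item out of `done` and adjoining it wherever 2 ≤ count (once count reaches 2 it
-- only grows until the next separator, so "2 ≤ count" ↔ "item was appended").
def convertA_loop (sep : String) : List String → List (List String) → List String → Nat → List (List String)
  | [], done, item, count => done ++ (if 2 ≤ count then [item] else [])
  | l :: ls, done, item, count =>
    if PySem.Str.isIn sep l then
      convertA_loop sep ls (if 2 ≤ count then done ++ [item] else done) (pvHeader sep l) 0
    else
      convertA_loop sep ls done (item ++ [l]) (count + 1)

def convert (lines : List String) (timeseparator : String) : List (List String) :=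
  convertA_loop timeseparator lines [] [] 0

-- ===== PORT B =====
-- pass 1: partition into blocks (header, content); pass 2: emit qualifying blocks
def convertB_blocks (sep : String) : List String → List (List String × List String) → List String → List String → List (List String × List String)
  | [], blocks, header, content => blocks ++ [(header, content)]
  | l :: ls, blocks, header, content =>
    if PySem.Str.isIn sep l then
      convertB_blocks sep ls (blocks ++ [(header, content)]) (pvHeader sep l) []
    else
      convertB_blocks sep ls blocks header (content ++ [l])

def pvEmit (blocks : List (List String × List String)) : List (List String) :=
  (blocks.filter (fun p => 2 ≤ p.2.length)).map (fun p => p.1 ++ p.2)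

def convert_alt (lines : List String) (timeseparator : String) : List (List String) :=
  pvEmit (convertB_blocks timeseparator lines [] [] [])

-- ===== PRECONDITION & SPEC =====
-- Pre_ excludes timeseparator = "": there '"" in line' is True and line.split("") raises
-- ValueError in A (and in B alike).
def Pre_convert (lines : List String) (timeseparator : String) : Prop := timeseparator ≠ ""
instance (lines : List String) (timeseparator : String) : Decidable (Pre_convert lines timeseparator) := by unfold Pre_convert; infer_instance
def pvWitness_convert : List String × String := (["00:01 --> 00:02", "alice", "hello there"], "-->")

def Spec_convert (lines : List String) (timeseparator : String) (out : List (List String)) : Prop := out = convert_alt lines timeseparator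
instance (lines : List String) (timeseparator : String) (out : List (List String)) : Decidable (Spec_convert lines timeseparator out) := by unfold Spec_convert; infer_instance

-- ===== CLAIM (what is proved, stated in full; the proofs are below) =====
def Claim_equal_convert : Prop := ∀ (lines : List String) (timeseparator : String), Dom_convert lines timeseparator → Pre_convert lines timeseparator → Spec_convert lines timeseparator (convert lines timeseparator)

-- ===== LEMMAS AND PROOFS =====
lemma pvEmit_append_singleton (bs : List (List String × List String)) (h c) :
    pvEmit (bs ++ [(h, c)]) = pvEmit bs ++ (if 2 ≤ c.length then [h ++ c] else []) := by
  simp only [pvEmit, List.filter_append, List.map_append]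
  by_cases hc : 2 ≤ c.length <;> simp [hc]

lemma loop_eq (sep : String) (ls : List String) :
    ∀ (blocks : List (List String × List String)) (header content : List String),
      convertA_loop sep ls (pvEmit blocks) (header ++ content) content.length
        = pvEmit (convertB_blocks sep ls blocks header content) := by
  induction ls with
  | nil =>
    intro blocks header content
    simp [convertA_loop, convertB_blocks, pvEmit_append_singleton]
  | cons l ls ih =>
    intro blocks header content
    simp only [convertA_loop, convertB_blocks]
    by_cases hl : PySem.Str.isIn sep l
    · simp only [hl, if_true]
      have hflip : (if 2 ≤ content.length then pvEmit blocks ++ [header ++ content] else pvEmit blocks)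
          = pvEmit (blocks ++ [(header, content)]) := by
        rw [pvEmit_append_singleton]; split_ifs <;> simp
      rw [hflip]
      simpa using ih (blocks ++ [(header, content)]) (pvHeader sep l) []
    · simp only [hl, if_false]
      have := ih blocks header (content ++ [l])
      simpa [List.append_assoc] using this

-- ===== VERDICT (by name: the statement is the Claim_ definition above) =====
theorem convert_spec : Claim_equal_convert := by
  intro lines sep _ _
  show convert lines sep = convert_alt lines sep
  have := loop_eq sep lines [] [] []
  simpa [convert, convert_alt, pvEmit] using this
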